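-- pv_equiv track=rewrite | github.com/barnjamin/rareaf | contracts/platform-token-mint.py | get_byte_positions
-- ===== SOURCE A (Python) =====
-- def get_byte_positions(program):
--     # Find the store commands, get the strpos of the
--     # variable on the line prior
--     positions, position = [], 0
--     lines = program.split("\n")
--     for idx in range(len(lines)):
--         if lines[idx][:5] == "store":
--             l = len(lines[idx-1])
--             positions.append((position - (l +1), l))
--         position += len(lines[idx]) + 1
--     return positions
-- ===== SOURCE B (Python) =====
-- def get_byte_positions(program):
--     lines = program.split("\n")
--     offsets = [0]
--     for ln in lines:
--         offsets.append(offsets[-1] + len(ln) + 1)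
--     return [(offsets[i] - (len(lines[i - 1]) + 1), len(lines[i - 1]))
--             for i, ln in enumerate(lines)
--             if ln.startswith("store")]
-- ===== Notes on version B (the rewrite author's own statement) =====
-- stated objective: alternative
-- what changed: B first builds a per-line byte-offset table by a cumulative scan and then emits the store lines via a filtering comprehension over enumerate, replacing A's single index loop that threads a running position and result list through one accumulator.
import Mathlib
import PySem

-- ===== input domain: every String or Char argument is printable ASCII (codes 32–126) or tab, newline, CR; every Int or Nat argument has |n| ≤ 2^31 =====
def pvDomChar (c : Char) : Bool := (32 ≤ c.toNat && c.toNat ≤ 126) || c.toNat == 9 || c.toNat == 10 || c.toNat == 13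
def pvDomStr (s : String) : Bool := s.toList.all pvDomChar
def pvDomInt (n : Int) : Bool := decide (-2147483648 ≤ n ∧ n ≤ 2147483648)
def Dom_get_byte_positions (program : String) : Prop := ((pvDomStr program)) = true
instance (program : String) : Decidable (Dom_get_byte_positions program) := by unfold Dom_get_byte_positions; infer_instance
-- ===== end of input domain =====

-- B builds a per-line byte-offset table first and then emits the store lines by a
-- filtering pass over enumerate, instead of A's single index loop threading a running
-- position accumulator (objective: alternative decomposition, same cost).

-- ===== PORT A =====
def get_byte_positions (program : String) : List (Int × Int) :=
  let lines := (PySem.Str.split? program "\n").getD []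
  ((PySem.List.pyRange 0 (PySem.List.len lines) 1).foldl
    (fun (st : List (Int × Int) × Int) idx =>
      let line := PySem.List.pyGetD lines idx ""
      let positions :=
        if PySem.Str.slice line none (some 5) = "store" then
          let l := PySem.Str.len (PySem.List.pyGetD lines (idx - 1) "")
          st.1 ++ [(st.2 - (l + 1), l)]
        else st.1
      (positions, st.2 + PySem.Str.len line + 1))
    (([], 0) : List (Int × Int) × Int)).1

-- ===== PORT B =====
def get_byte_positions_alt (program : String) : List (Int × Int) :=
  let lines := (PySem.Str.split? program "\n").getD []
  let offsets := lines.foldl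
    (fun (offs : List Int) ln => offs ++ [PySem.List.pyGetD offs (-1) 0 + PySem.Str.len ln + 1])
    [0]
  (PySem.List.enumerate lines).filterMap (fun p =>
    if PySem.Str.startswith p.2 "store" then
      let prev := PySem.List.pyGetD lines (p.1 - 1) ""
      some (PySem.List.pyGetD offsets p.1 0 - (PySem.Str.len prev + 1), PySem.Str.len prev)
    else none)

-- ===== PRECONDITION & SPEC =====
def Spec_get_byte_positions (program : String) (out : List (Int × Int)) : Prop := out = get_byte_positions_alt program
instance (program : String) (out : List (Int × Int)) : Decidable (Spec_get_byte_positions program out) := by unfold Spec_get_byte_positions; infer_instance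

-- ===== CLAIM (what is proved, stated in full; the proofs are below) =====
def Claim_equal_get_byte_positions : Prop := ∀ (program : String), Dom_get_byte_positions program → Spec_get_byte_positions program (get_byte_positions program)

-- ===== LEMMAS AND PROOFS =====

-- total byte length of a list of lines (each line plus its newline)
def pvOff (ls : List String) : Int := (ls.map (fun l => PySem.Str.len l + 1)).sum

-- the running byte offsets B's first loop appends after starting position p
def pvTails (p : Int) : List String → List Int
  | [] => []
  | l :: ls => (p + PySem.Str.len l + 1) :: pvTails (p + PySem.Str.len l + 1) ls

-- the item a filtering pass emits at index j, with the byte position written as pvOff of the prefix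
def pvG (ls : List String) (j : Int) : Option (Int × Int) :=
  if PySem.Str.startswith (PySem.List.pyGetD ls j "") "store" then
    let prev := PySem.List.pyGetD ls (j - 1) ""
    some (pvOff (ls.take j.toNat) - (PySem.Str.len prev + 1), PySem.Str.len prev)
  else none

-- Python's s[:5] == "store" is s.startswith("store")
theorem pvCond (s : String) :
    (PySem.Str.slice s none (some 5) = "store") ↔ PySem.Str.startswith s "store" = true := by
  have h1 : (PySem.Str.slice s none (some 5)).toList = s.toList.take 5 := by
    simp [PySem.Str.toList_slice, PySem.List.slice_to _ (by norm_num : (0:Int) ≤ 5)]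
  constructor
  · intro h
    have ht : s.toList.take 5 = "store".toList := by rw [← h1, h]
    simp only [PySem.Str.startswith_eq, PySem.Chars.startswith_iff]
    rw [List.prefix_iff_eq_take, show ("store".toList).length = 5 from rfl]
    exact ht.symm
  · intro h
    simp only [PySem.Str.startswith_eq, PySem.Chars.startswith_iff, List.prefix_iff_eq_take,
      show ("store".toList).length = 5 from rfl] at h
    have : (PySem.Str.slice s none (some 5)).toList = "store".toList := by rw [h1, ← h]
    exact String.toList_injective this

theorem pvOff_take_succ (ls : List String) (m : Nat) (h : m < ls.length) :
    pvOff (ls.take (m + 1)) = pvOff (ls.take m) + PySem.Str.len ls[m] + 1 := by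
  unfold pvOff
  rw [List.take_add_one]
  simp only [List.getElem?_eq_getElem h, Option.toList_some, List.map_append, List.sum_append,
    List.map_cons, List.map_nil, List.sum_cons, List.sum_nil]
  ring

-- invariant of A's loop: after m steps, position = pvOff of the first m lines and
-- the accumulated output is the filtering pass over the first m indices
theorem pvA_loop (ls : List String) (m : Nat) (h : m ≤ ls.length) :
    (PySem.List.pyRange 0 (m : Int) 1).foldl
      (fun (st : List (Int × Int) × Int) idx =>
        let line := PySem.List.pyGetD ls idx ""
        let positions :=
          if PySem.Str.slice line none (some 5) = "store" then
            let l := PySem.Str.len (PySem.List.pyGetD ls (idx - 1) "")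
            st.1 ++ [(st.2 - (l + 1), l)]
          else st.1
        (positions, st.2 + PySem.Str.len line + 1))
      (([], 0) : List (Int × Int) × Int)
    = ((PySem.List.pyRange 0 (m : Int) 1).filterMap (pvG ls), pvOff (ls.take m)) := by
  induction m with
  | zero =>
    simp [PySem.List.pyRange_one_eq_nil (le_refl 0), pvOff]
  | succ m ih =>
    have hc : ((m + 1 : Nat) : Int) = (m : Int) + 1 := by push_cast; ring
    rw [hc, PySem.List.pyRange_one_succ_right (by positivity)]
    rw [List.foldl_append, List.filterMap_append, ih (by omega)]
    simp only [List.foldl_cons, List.foldl_nil, List.filterMap_cons, List.filterMap_nil]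
    rw [pvOff_take_succ ls m (by omega)]
    have hline : PySem.List.pyGetD ls (m : Int) "" = ls[m] := by
      rw [PySem.List.pyGetD_natCast]
      exact List.getD_eq_getElem ls "" (by omega)
    unfold pvG
    by_cases hcond : PySem.Str.startswith (PySem.List.pyGetD ls ((m : Nat) : Int) "") "store" = true
    · simp only [if_pos hcond, if_pos ((pvCond _).mpr hcond)]
      simp [hline]
      rfl
    · simp only [if_neg hcond, if_neg (fun hh => hcond ((pvCond _).mp hh))]
      simp [hline]
      try rfl

-- B's first loop builds init ++ the running offsets from init's last entry
theorem pvOffsets_foldl (ls : List String) (init : List Int) (h : init ≠ []) :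
    ls.foldl (fun (offs : List Int) ln => offs ++ [PySem.List.pyGetD offs (-1) 0 + PySem.Str.len ln + 1]) init
      = init ++ pvTails (init.getLast h) ls := by
  induction ls generalizing init with
  | nil => simp [pvTails]
  | cons l ls ih =>
    rw [List.foldl_cons]
    rw [PySem.List.pyGetD_neg_one init 0 h]
    rw [ih (init ++ [init.getLast h + PySem.Str.len l + 1]) (by simp)]
    simp [pvTails]

theorem pvTails_get (ls : List String) (p : Int) (j : Nat) (h : j < ls.length) :
    (pvTails p ls)[j]? = some (p + pvOff (ls.take (j + 1))) := by
  induction ls generalizing p j with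
  | nil => simp at h
  | cons l ls ih =>
    cases j with
    | zero => simp [pvTails, pvOff]; ring
    | succ j =>
      simp only [pvTails, List.getElem?_cons_succ]
      rw [ih _ j (by simpa using h)]
      simp [pvOff]
      ring

-- entry j of B's offsets table is the byte offset of line j
theorem pvOffsets_get (ls : List String) (j : Nat) (h : j ≤ ls.length) :
    (0 :: pvTails 0 ls).getD j 0 = pvOff (ls.take j) := by
  cases j with
  | zero => simp [pvOff]
  | succ j =>
    rw [List.getD_cons_succ, List.getD_eq_getElem?_getD, pvTails_get ls 0 j (by omega)]
    simp

-- ===== VERDICT (by name: the statement is the Claim_ definition above) =====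
theorem get_byte_positions_spec : Claim_equal_get_byte_positions := by
  intro program _
  unfold Spec_get_byte_positions get_byte_positions get_byte_positions_alt
  set lines := (PySem.Str.split? program "\n").getD [] with hl
  simp only [PySem.List.len_eq]
  rw [pvA_loop lines lines.length le_rfl, List.take_length]
  rw [pvOffsets_foldl lines [0] (by simp), show ([0] : List Int).getLast (by simp) = 0 from rfl]
  rw [PySem.List.enumerate_eq_map_pyRange lines "", List.filterMap_map]
  simp only [PySem.List.len_eq]
  apply List.filterMap_congr
  intro j hj
  obtain ⟨hj0, hjn⟩ := (PySem.List.mem_pyRange_one).mp hj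
  obtain ⟨k, rfl⟩ : ∃ k : Nat, j = (k : Int) := ⟨j.toNat, (Int.toNat_of_nonneg hj0).symm⟩
  have hk : k < lines.length := by exact_mod_cast hjn
  unfold pvG
  by_cases hcond : PySem.Str.startswith (PySem.List.pyGetD lines ((k : Nat) : Int) "") "store" = true
  · simp only [Function.comp, if_pos hcond]
    rw [show ([0] ++ pvTails 0 lines : List Int) = 0 :: pvTails 0 lines from rfl]
    rw [PySem.List.pyGetD_natCast, pvOffsets_get lines k (by omega)]
    simp
  · simp only [Function.comp, if_neg hcond]
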